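-- pv_equiv track=rewrite | github.com/ngho470-pixel/project | stage_correctness_suite.py | rewrite_policy_expr
-- ===== SOURCE A (Python) =====
-- from typing import Dict, List, Optional, Tuple
--
-- KEYWORDS = {"and", "or", "in", "like", "not", "is", "null", "between", "exists"}
--
-- def tokenize(expr: str):
--     tokens = []
--     i = 0
--     while i < len(expr):
--         ch = expr[i]
--         if ch.isspace():
--             i += 1
--             continue
--         if ch.isalpha() or ch == "_":
--             j = i + 1
--             while j < len(expr) and (expr[j].isalnum() or expr[j] in "_."):
--                 j += 1
--             tokens.append(("ident", expr[i:j]))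
--             i = j
--             continue
--         if ch.isdigit() or (ch == "-" and i + 1 < len(expr) and expr[i + 1].isdigit()):
--             j = i + 1
--             while j < len(expr) and (expr[j].isdigit() or expr[j] == "."):
--                 j += 1
--             tokens.append(("number", expr[i:j]))
--             i = j
--             continue
--         if ch == "'":
--             j = i + 1
--             buf = ""
--             while j < len(expr):
--                 if expr[j] == "'" and j + 1 < len(expr) and expr[j + 1] == "'":
--                     buf += "'"
--                     j += 2
--                     continue
--                 if expr[j] == "'":
--                     j += 1
--                     break
--                 buf += expr[j]
--                 j += 1
--             tokens.append(("string", buf))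
--             i = j
--             continue
--         if ch in "(),":
--             tokens.append((ch, ch))
--             i += 1
--             continue
--         if ch in "=<>!":
--             if i + 1 < len(expr) and expr[i:i + 2] in ("<>", "<=", ">=", "!="):
--                 tokens.append(("op", expr[i:i + 2]))
--                 i += 2
--                 continue
--             j = i + 1
--             if j < len(expr) and expr[j] == "=":
--                 j += 1
--             tokens.append(("op", expr[i:j]))
--             i = j
--             continue
--         tokens.append((ch, ch))
--         i += 1
--     return tokens
--
-- def rewrite_policy_expr(target: str, expr: str, target_alias: Optional[str] = None) -> str:
--     tokens = tokenize(expr)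
--     other_tables: List[str] = []
--     out_parts: List[str] = []
--     for typ, text in tokens:
--         if typ == "ident":
--             low = text.lower()
--             if low in KEYWORDS:
--                 out_parts.append(low)
--                 continue
--             if "." in text:
--                 tbl, col = text.split(".", 1)
--                 tbl_low = tbl.lower()
--                 col_low = col.lower()
--                 if tbl_low == target.lower():
--                     if target_alias:
--                         out_parts.append(f"{target_alias}.{col_low}")
--                     else:
--                         out_parts.append(col_low)
--                 else:
--                     out_parts.append(f"{tbl_low}.{col_low}")
--                     if tbl_low not in other_tables:
--                         other_tables.append(tbl_low)
--             else:
--                 if target_alias: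
--                     out_parts.append(f"{target_alias}.{low}")
--                 else:
--                     out_parts.append(low)
--         elif typ == "string":
--             out_parts.append("'" + text.replace("'", "''") + "'")
--         else:
--             out_parts.append(text)
--     expr_sql = " ".join(out_parts)
--     if other_tables:
--         from_clause = ", ".join(other_tables)
--         expr_sql = f"EXISTS (SELECT 1 FROM {from_clause} WHERE {expr_sql})"
--     return expr_sql
-- ===== SOURCE B (Python) =====
-- # Alternative implementation: stack-based lexer (consumes a reversed char stack with O(1) pops
-- # instead of index arithmetic) + two-pass rendering (map tokens to SQL, then dedup table names
-- # once at the end) instead of A's single loop with twin accumulators.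
-- from typing import Optional
--
-- KEYWORDS = {"and", "or", "in", "like", "not", "is", "null", "between", "exists"}
--
-- _TWO_CHAR_OPS = ("<>", "<=", ">=", "!=")
--
--
-- def _pop_run(pred, stack):
--     out = []
--     while stack and pred(stack[-1]):
--         out.append(stack.pop())
--     return "".join(out)
--
--
-- def _pop_string(stack):
--     out = []
--     while stack:
--         c = stack.pop()
--         if c == "'":
--             if stack and stack[-1] == "'":
--                 stack.pop()
--                 out.append("'")
--             else:
--                 break
--         else:
--             out.append(c)
--     return "".join(out)
--
--
-- def _lex(expr):
--     stack = list(expr)[::-1]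
--     tokens = []
--     while stack:
--         c = stack.pop()
--         if c.isspace():
--             continue
--         if c.isalpha() or c == "_":
--             tokens.append(("ident", c + _pop_run(lambda x: x.isalnum() or x in "_.", stack)))
--         elif c.isdigit() or (c == "-" and stack and stack[-1].isdigit()):
--             tokens.append(("number", c + _pop_run(lambda x: x.isdigit() or x == ".", stack)))
--         elif c == "'":
--             tokens.append(("string", _pop_string(stack)))
--         elif c in "(),":
--             tokens.append((c, c))
--         elif c in "=<>!":
--             if stack and (c + stack[-1] in _TWO_CHAR_OPS or stack[-1] == "="):
--                 tokens.append(("op", c + stack.pop()))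
--             else:
--                 tokens.append(("op", c))
--         else:
--             tokens.append((c, c))
--     return tokens
--
--
-- def _sql_of(typ, text, target_low, alias_prefix):
--     if typ == "string":
--         return "'" + text.replace("'", "''") + "'"
--     if typ != "ident":
--         return text
--     low = text.lower()
--     if low in KEYWORDS:
--         return low
--     tbl, dot, col = text.partition(".")
--     if not dot:
--         return alias_prefix + low
--     tbl_low, col_low = tbl.lower(), col.lower()
--     if tbl_low == target_low:
--         return alias_prefix + col_low if alias_prefix else col_low
--     return tbl_low + "." + col_low
--
--
-- def _table_of(typ, text, target_low):
--     if typ != "ident":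
--         return None
--     low = text.lower()
--     if low in KEYWORDS:
--         return None
--     tbl, dot, _col = text.partition(".")
--     if dot and tbl.lower() != target_low:
--         return tbl.lower()
--     return None
--
--
-- def rewrite_policy_expr(target: str, expr: str, target_alias: Optional[str] = None) -> str:
--     alias_prefix = target_alias + "." if target_alias else ""
--     target_low = target.lower()
--     tokens = _lex(expr)
--     rendered = [_sql_of(typ, text, target_low, alias_prefix) for typ, text in tokens]
--     tables = [t for typ, text in tokens
--               if (t := _table_of(typ, text, target_low)) is not None]
--     body = " ".join(rendered)
--     if tables:
--         return "EXISTS (SELECT 1 FROM " + ", ".join(dict.fromkeys(tables)) + " WHERE " + body + ")"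
--     return body
-- ===== Notes on version B (the rewrite author's own statement) =====
-- stated objective: alternative
-- what changed: Replaces the index-arithmetic character scanner with a stack-based lexer that pops a reversed character list, and replaces the single rewrite loop with twin accumulators by two passes: a map rendering each token to SQL (via str.partition) and a comprehension collecting table names deduplicated once at the end with dict.fromkeys.
import Mathlib
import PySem

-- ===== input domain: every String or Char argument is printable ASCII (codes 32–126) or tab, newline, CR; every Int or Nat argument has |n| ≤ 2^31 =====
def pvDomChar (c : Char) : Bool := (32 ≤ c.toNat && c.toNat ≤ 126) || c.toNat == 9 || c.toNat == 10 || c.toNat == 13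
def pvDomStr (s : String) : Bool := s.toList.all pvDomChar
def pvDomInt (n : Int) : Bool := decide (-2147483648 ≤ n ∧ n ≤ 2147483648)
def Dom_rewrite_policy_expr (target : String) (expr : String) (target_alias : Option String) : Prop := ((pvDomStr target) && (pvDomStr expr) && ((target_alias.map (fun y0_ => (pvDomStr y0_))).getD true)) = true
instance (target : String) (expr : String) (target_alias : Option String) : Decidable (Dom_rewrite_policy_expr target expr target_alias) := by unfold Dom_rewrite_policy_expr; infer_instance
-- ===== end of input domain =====

-- B replaces A's index-arithmetic lexer by a stack-consuming lexer and A's single rewrite loop with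
-- twin accumulators by a map over tokens plus a second pass deduplicating table names at the end
-- (objective: alternative, same cost).

-- Token type shared by both ports (Python's (typ, text) tuples with string tags "ident"/"number"/
-- "string"/"op"/single-char; the tag is only ever compared against "ident"/"string").
inductive PvTok
  | ident (t : List Char)
  | num (t : List Char)
  | str (t : List Char)
  | op (t : List Char)
  | punct (c : Char)
deriving DecidableEq, Repr

def pvKws : List (List Char) :=
  (["and", "or", "in", "like", "not", "is", "null", "between", "exists"]).map String.toList

def pvIdentChar (c : Char) : Bool := PySem.Chars.isalnum c || c = '_' || c = '.'
def pvNumChar (c : Char) : Bool := PySem.Chars.isdigit c || c = '.'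
def pvTwoOps : List (List Char) := [['<', '>'], ['<', '='], ['>', '='], ['!', '=']]

-- tiny termination lemmas (cited by name from decreasing_by; small proof terms)
theorem pvDecStep (len j : Nat) (h : j < len) : len - (j + 1) < len - j :=
  Nat.sub_succ_lt_self len j h
theorem pvDecLe (len i j : Nat) (h : i < len) (hj : i + 1 ≤ j) : len - j < len - i :=
  lt_of_le_of_lt (Nat.sub_le_sub_left hj len) (Nat.sub_succ_lt_self len i h)
theorem pvDecTwo (len j : Nat) (h : j < len) : len - (j + 2) < len - j :=
  lt_of_le_of_lt (Nat.sub_le_sub_left (Nat.le_succ (j + 1)) len) (Nat.sub_succ_lt_self len j h)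
theorem pvDecCons {α : Type} (c : α) (cs : List α) {n : Nat} (h : n ≤ cs.length) :
    n < (c :: cs).length := Nat.lt_succ_of_le h

-- ===== PORT A =====

-- inner `while` of the ident/number branches: advance j while the class predicate holds
def scanRunA (p : Char → Bool) (s : List Char) (j : Nat) : Nat :=
  if h : j < s.length then
    if p s[j] then scanRunA p s (j + 1) else j
  else j
termination_by s.length - j
decreasing_by exact pvDecStep s.length j h

theorem le_scanRunA (p : Char → Bool) (s : List Char) (j : Nat) : j ≤ scanRunA p s j := by
  unfold scanRunA
  split
  · split
    · have := le_scanRunA p s (j + 1); omega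
    · omega
  · omega
termination_by s.length - j

-- inner `while` of the string branch: collect buf, handle '' escapes, stop after closing quote
def scanStrA (s : List Char) (j : Nat) (buf : List Char) : List Char × Nat :=
  if h : j < s.length then
    if s[j] = '\'' then
      if h2 : j + 1 < s.length then
        if s[j + 1] = '\'' then scanStrA s (j + 2) (buf ++ ['\''])
        else (buf, j + 1)
      else (buf, j + 1)
    else scanStrA s (j + 1) (buf ++ [s[j]])
  else (buf, j)
termination_by s.length - j
decreasing_by
  · exact pvDecTwo s.length j h
  · exact pvDecStep s.length j h

theorem le_scanStrA (s : List Char) (j : Nat) (buf : List Char) : j ≤ (scanStrA s j buf).2 := by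
  unfold scanStrA
  split
  · split
    · split
      · split
        · have := le_scanStrA s (j + 2) (buf ++ ['\'']); omega
        · omega
      · omega
    · have := le_scanStrA s (j + 1) (buf ++ [s[j]]); omega
  · omega
termination_by s.length - j

def pvNextDigit (s : List Char) (i : Nat) : Bool :=
  if h : i + 1 < s.length then PySem.Chars.isdigit s[i + 1] else false

-- tokenize(expr): the outer while-loop over the index i
def tokA (s : List Char) (i : Nat) : List PvTok :=
  if h : i < s.length then
    let ch := s[i]
    if PySem.Chars.isspace ch then tokA s (i + 1)
    else if PySem.Chars.isalpha ch || ch = '_' then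
      let j := scanRunA pvIdentChar s (i + 1)
      PvTok.ident (PySem.List.slice s (some (i : Int)) (some (j : Int))) :: tokA s j
    else if PySem.Chars.isdigit ch || (decide (ch = '-') && pvNextDigit s i) then
      let j := scanRunA pvNumChar s (i + 1)
      PvTok.num (PySem.List.slice s (some (i : Int)) (some (j : Int))) :: tokA s j
    else if ch = '\'' then
      let r := scanStrA s (i + 1) []
      PvTok.str r.1 :: tokA s r.2
    else if ch = '(' ∨ ch = ')' ∨ ch = ',' then
      PvTok.punct ch :: tokA s (i + 1)
    else if ch = '=' ∨ ch = '<' ∨ ch = '>' ∨ ch = '!' then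
      if decide (i + 1 < s.length) &&
          decide (PySem.List.slice s (some (i : Int)) (some ((i : Int) + 2)) ∈ pvTwoOps) then
        PvTok.op (PySem.List.slice s (some (i : Int)) (some ((i : Int) + 2))) :: tokA s (i + 2)
      else
        let j := if h2 : i + 1 < s.length then (if s[i + 1] = '=' then i + 2 else i + 1) else i + 1
        PvTok.op (PySem.List.slice s (some (i : Int)) (some (j : Int))) :: tokA s j
    else PvTok.punct ch :: tokA s (i + 1)
  else []
termination_by s.length - i
decreasing_by
  · exact pvDecStep s.length i h
  · exact pvDecLe s.length i _ h (le_scanRunA pvIdentChar s (i + 1))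
  · exact pvDecLe s.length i _ h (le_scanRunA pvNumChar s (i + 1))
  · exact pvDecLe s.length i _ h (le_scanStrA s (i + 1) [])
  · exact pvDecStep s.length i h
  · exact pvDecTwo s.length i h
  · refine pvDecLe s.length i _ h ?_
    split
    · split
      · exact Nat.le_succ (i + 1)
      · exact Nat.le_refl (i + 1)
    · exact Nat.le_refl (i + 1)
  · exact pvDecStep s.length i h

-- one iteration of A's rewrite loop over (other_tables, out_parts)
def stepA (targetLow : List Char) (aliasT : Option (List Char))
    (st : List (List Char) × List (List Char)) (tok : PvTok) :
    List (List Char) × List (List Char) :=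
  match tok with
  | .ident text =>
    let low := PySem.Chars.lower text
    if low ∈ pvKws then (st.1, st.2 ++ [low])
    else if '.' ∈ text then
      -- text.split(".", 1) with '.' ∈ text: the part before the first '.', and the rest (exact hand port)
      let tbl := text.takeWhile (· ≠ '.')
      let col := (text.dropWhile (· ≠ '.')).tail
      let tblLow := PySem.Chars.lower tbl
      let colLow := PySem.Chars.lower col
      if tblLow = targetLow then
        match aliasT with
        | some a => (st.1, st.2 ++ [a ++ '.' :: colLow])
        | none => (st.1, st.2 ++ [colLow])
      else
        ((if tblLow ∈ st.1 then st.1 else st.1 ++ [tblLow]), st.2 ++ [tblLow ++ '.' :: colLow])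
    else
      match aliasT with
      | some a => (st.1, st.2 ++ [a ++ '.' :: low])
      | none => (st.1, st.2 ++ [low])
  | .str text => (st.1, st.2 ++ ['\'' :: (PySem.Chars.replace text ['\''] ['\'', '\'']) ++ ['\'']])
  | .num t => (st.1, st.2 ++ [t])
  | .op t => (st.1, st.2 ++ [t])
  | .punct c => (st.1, st.2 ++ [[c]])

def rewrite_policy_expr (target : String) (expr : String) (target_alias : Option String) : String :=
  let tokens := tokA expr.toList 0
  -- Python's `if target_alias:` is truthiness: None and "" both falsy
  let aliasT : Option (List Char) := match target_alias with
    | some a => if a.toList = [] then none else some a.toList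
    | none => none
  let st := tokens.foldl (stepA (PySem.Chars.lower target.toList) aliasT) ([], [])
  let exprSql := PySem.Chars.join [' '] st.2
  if st.1 = [] then String.ofList exprSql
  else String.ofList ("EXISTS (SELECT 1 FROM ".toList ++ PySem.Chars.join [',', ' '] st.1
    ++ " WHERE ".toList ++ exprSql ++ [')'])

-- ===== PORT B =====

-- _pop_run: pop from the stack while pred holds (stack top = list head)
def popRun (p : Char → Bool) : List Char → List Char × List Char
  | [] => ([], [])
  | c :: cs => if p c then (let r := popRun p cs; (c :: r.1, r.2)) else ([], c :: cs)

-- _pop_string: pop until an unescaped closing quote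
def popStr : List Char → List Char × List Char
  | [] => ([], [])
  | c :: cs =>
    if c = '\'' then
      match cs with
      | c2 :: cs2 => if c2 = '\'' then (let r := popStr cs2; ('\'' :: r.1, r.2)) else ([], c2 :: cs2)
      | [] => ([], [])
    else (let r := popStr cs; (c :: r.1, r.2))

theorem popRun_snd_le (p : Char → Bool) (l : List Char) : (popRun p l).2.length ≤ l.length := by
  induction l with
  | nil => exact Nat.le.refl
  | cons c cs ih =>
    simp only [popRun]
    split
    · simp; omega
    · exact Nat.le.refl

theorem popStr_esc (cs : List Char) :
    popStr ('\'' :: '\'' :: cs) = ('\'' :: (popStr cs).1, (popStr cs).2) := by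
  rw [popStr.eq_def]; simp

theorem popStr_close (c2 : Char) (cs : List Char) (h : ¬ c2 = '\'') :
    popStr ('\'' :: c2 :: cs) = ([], c2 :: cs) := by
  rw [popStr.eq_def]; simp [h]

theorem popStr_single : popStr ['\''] = ([], []) := rfl

theorem popStr_cons (c : Char) (cs : List Char) (h : ¬ c = '\'') :
    popStr (c :: cs) = (c :: (popStr cs).1, (popStr cs).2) := by
  rw [popStr.eq_def]; simp [h]

theorem popStr_snd_le : ∀ (l : List Char), (popStr l).2.length ≤ l.length
  | [] => Nat.le.refl
  | c :: cs => by
    by_cases hc : c = '\''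
    · subst hc
      cases cs with
      | nil => simp [popStr_single]
      | cons c2 cs2 =>
        by_cases h2 : c2 = '\''
        · subst h2
          rw [popStr_esc]
          have := popStr_snd_le cs2
          simp; omega
        · rw [popStr_close _ _ h2]
          simp
    · rw [popStr_cons _ _ hc]
      have := popStr_snd_le cs
      simp; omega

-- _lex: the stack-consuming loop (the stack holds the not-yet-consumed characters, top first)
def tokB : List Char → List PvTok
  | [] => []
  | c :: cs =>
    if PySem.Chars.isspace c then tokB cs
    else if PySem.Chars.isalpha c || c = '_' then
      let r := popRun pvIdentChar cs
      PvTok.ident (c :: r.1) :: tokB r.2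
    else if PySem.Chars.isdigit c ||
        (decide (c = '-') && (match cs with | d :: _ => PySem.Chars.isdigit d | [] => false)) then
      let r := popRun pvNumChar cs
      PvTok.num (c :: r.1) :: tokB r.2
    else if c = '\'' then
      let r := popStr cs
      PvTok.str r.1 :: tokB r.2
    else if c = '(' ∨ c = ')' ∨ c = ',' then PvTok.punct c :: tokB cs
    else if c = '=' ∨ c = '<' ∨ c = '>' ∨ c = '!' then
      match cs with
      | d :: rest =>
        if [c, d] ∈ pvTwoOps ∨ d = '=' then PvTok.op [c, d] :: tokB rest
        else PvTok.op [c] :: tokB (d :: rest)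
      | [] => PvTok.op [c] :: tokB []
    else PvTok.punct c :: tokB cs
termination_by l => l.length
decreasing_by
  · exact pvDecCons _ _ (Nat.le_refl _)
  · exact pvDecCons _ _ (popRun_snd_le pvIdentChar _)
  · exact pvDecCons _ _ (popRun_snd_le pvNumChar _)
  · exact pvDecCons _ _ (popStr_snd_le _)
  · exact pvDecCons _ _ (Nat.le_refl _)
  · exact pvDecCons _ _ (Nat.le_succ _)
  · exact pvDecCons _ _ (Nat.le_refl _)
  · exact pvDecCons _ _ (Nat.le_refl _)
  · exact pvDecCons _ _ (Nat.le_refl _)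

-- _sql_of: the SQL text one token contributes
def sqlOfTok (targetLow : List Char) (aliasPrefix : List Char) (tok : PvTok) : List Char :=
  match tok with
  | .str t => '\'' :: (PySem.Chars.replace t ['\''] ['\'', '\'']) ++ ['\'']
  | .ident t =>
    let low := PySem.Chars.lower t
    if low ∈ pvKws then low
    else
      -- text.partition("."): span at the first '.'
      let sp := t.span (· ≠ '.')
      match sp.2 with
      | [] => aliasPrefix ++ low
      | _ :: col =>
        let tblLow := PySem.Chars.lower sp.1
        let colLow := PySem.Chars.lower col
        if tblLow = targetLow then (if aliasPrefix ≠ [] then aliasPrefix ++ colLow else colLow)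
        else tblLow ++ '.' :: colLow
  | .num t => t
  | .op t => t
  | .punct c => [c]

-- _table_of: the foreign table a token references, if any
def tableOfTok (targetLow : List Char) (tok : PvTok) : Option (List Char) :=
  match tok with
  | .ident t =>
    let low := PySem.Chars.lower t
    if low ∈ pvKws then none
    else
      match t.span (· ≠ '.') with
      | (tbl, _ :: _) =>
        if PySem.Chars.lower tbl ≠ targetLow then some (PySem.Chars.lower tbl) else none
      | _ => none
  | _ => none

def rewrite_policy_expr_alt (target : String) (expr : String) (target_alias : Option String) : String :=
  let aliasPrefix : List Char := match target_alias with
    | some a => if a.toList = [] then [] else a.toList ++ ['.']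
    | none => []
  let targetLow := PySem.Chars.lower target.toList
  let toks := tokB expr.toList
  let rendered := toks.map (sqlOfTok targetLow aliasPrefix)
  let tables := PySem.List.dedup (toks.filterMap (tableOfTok targetLow))
  let body := PySem.Chars.join [' '] rendered
  if tables = [] then String.ofList body
  else String.ofList ("EXISTS (SELECT 1 FROM ".toList ++ PySem.Chars.join [',', ' '] tables
    ++ " WHERE ".toList ++ body ++ [')'])

-- ===== PRECONDITION & SPEC =====
def Spec_rewrite_policy_expr (target : String) (expr : String) (target_alias : Option String) (out : String) : Prop := out = rewrite_policy_expr_alt target expr target_alias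
instance (target : String) (expr : String) (target_alias : Option String) (out : String) : Decidable (Spec_rewrite_policy_expr target expr target_alias out) := by unfold Spec_rewrite_policy_expr; infer_instance

-- ===== CLAIM (what is proved, stated in full; the proofs are below) =====
def Claim_equal_rewrite_policy_expr : Prop := ∀ (target : String) (expr : String) (target_alias : Option String), Dom_rewrite_policy_expr target expr target_alias → Spec_rewrite_policy_expr target expr target_alias (rewrite_policy_expr target expr target_alias)

-- ===== LEMMAS AND PROOFS =====

theorem popRun_eq (p : Char → Bool) (l : List Char) :
    popRun p l = (l.takeWhile p, l.dropWhile p) := by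
  induction l with
  | nil => simp [popRun]
  | cons c cs ih => simp only [popRun, List.takeWhile, List.dropWhile]; split <;> simp_all

theorem scanRunA_eq (p : Char → Bool) (s : List Char) (j : Nat) :
    scanRunA p s j = j + ((s.drop j).takeWhile p).length := by
  unfold scanRunA
  split
  · rename_i h
    rw [List.drop_eq_getElem_cons h]
    split
    · rename_i hp
      rw [scanRunA_eq p s (j + 1), List.takeWhile_cons_of_pos hp]
      simp; omega
    · rename_i hp
      rw [List.takeWhile_cons_of_neg (by simpa using hp)]
      simp
  · rename_i h
    rw [List.drop_eq_nil_of_le (by omega)]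
    simp
termination_by s.length - j

theorem scanRunA_drop (p : Char → Bool) (s : List Char) (j : Nat) :
    s.drop (scanRunA p s j) = (s.drop j).dropWhile p := by
  unfold scanRunA
  split
  · rename_i h
    rw [List.drop_eq_getElem_cons h]
    split
    · rename_i hp
      rw [scanRunA_drop p s (j + 1), List.dropWhile_cons_of_pos hp]
    · rename_i hp
      rw [List.dropWhile_cons_of_neg (by simpa using hp)]
      exact (List.drop_eq_getElem_cons h)
  · rename_i h
    rw [List.drop_eq_nil_of_le (by omega)]
    simp
termination_by s.length - j

theorem take_takeWhile (p : Char → Bool) (l : List Char) :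
    l.take (l.takeWhile p).length = l.takeWhile p :=
  (List.prefix_iff_eq_take.mp (List.takeWhile_prefix p)).symm

theorem slice_scanRun (p : Char → Bool) (s : List Char) (i : Nat) (h : i < s.length) :
    PySem.List.slice s (some (i : Int)) (some ((scanRunA p s (i + 1) : Nat) : Int)) =
      s[i] :: ((s.drop (i + 1)).takeWhile p) := by
  rw [PySem.List.slice_natCast, scanRunA_eq]
  rw [List.drop_eq_getElem_cons h]
  have : i + 1 + ((s.drop (i+1)).takeWhile p).length - i
      = ((s.drop (i+1)).takeWhile p).length + 1 := by omega
  rw [this, List.take_succ_cons, take_takeWhile]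

theorem slice_one (s : List Char) (i : Nat) (h : i < s.length) :
    PySem.List.slice s (some (i : Int)) (some ((i : Int) + 1)) = [s[i]] := by
  have h1 : ((i : Int) + 1) = ((i + 1 : Nat) : Int) := by push_cast; ring
  have h2 : i + 1 - i = 1 := by omega
  rw [h1, PySem.List.slice_natCast, h2, List.drop_eq_getElem_cons h]
  rfl

theorem slice_two (s : List Char) (i : Nat) (h : i + 1 < s.length) :
    PySem.List.slice s (some (i : Int)) (some ((i : Int) + 2)) = [s[i], s[i + 1]] := by
  have h1 : ((i : Int) + 2) = ((i + 2 : Nat) : Int) := by push_cast; ring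
  have h2 : i + 2 - i = 2 := by omega
  rw [h1, PySem.List.slice_natCast, h2, List.drop_eq_getElem_cons (by omega : i < s.length),
    List.drop_eq_getElem_cons h]
  rfl

theorem slice_one' (s : List Char) (i : Nat) (h : i < s.length) :
    PySem.List.slice s (some (i : Int)) (some ((i + 1 : Nat) : Int)) = [s[i]] := by
  have h1 : ((i + 1 : Nat) : Int) = (i : Int) + 1 := by push_cast; ring
  rw [h1, slice_one s i h]

theorem slice_two' (s : List Char) (i : Nat) (h : i + 1 < s.length) :
    PySem.List.slice s (some (i : Int)) (some ((i + 2 : Nat) : Int)) = [s[i], s[i + 1]] := by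
  have h1 : ((i + 2 : Nat) : Int) = (i : Int) + 2 := by push_cast; ring
  rw [h1, slice_two s i h]

theorem scanStrA_eq (s : List Char) (j : Nat) (buf : List Char) (hj : j ≤ s.length) :
    (scanStrA s j buf).1 = buf ++ (popStr (s.drop j)).1 ∧
      s.drop (scanStrA s j buf).2 = (popStr (s.drop j)).2 := by
  unfold scanStrA
  split
  · rename_i h
    have hdj : s.drop j = s[j] :: s.drop (j + 1) := List.drop_eq_getElem_cons h
    split
    · rename_i hq
      split
      · rename_i h2
        have hdj1 : s.drop (j + 1) = s[j + 1] :: s.drop (j + 2) := List.drop_eq_getElem_cons h2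
        split
        · rename_i hq2
          obtain ⟨ih1, ih2⟩ := scanStrA_eq s (j + 2) (buf ++ ['\'']) (by omega)
          rw [hdj, hdj1, hq, hq2, popStr_esc]
          constructor
          · rw [ih1]; simp
          · rw [ih2]
        · rename_i hq2
          rw [hdj, hdj1, hq, popStr_close _ _ hq2]
          constructor
          · simp
          · rw [← hdj1]
      · rename_i h2
        have hdj1 : s.drop (j + 1) = [] := List.drop_eq_nil_of_le (by omega)
        rw [hdj, hq, hdj1, popStr_single]
        exact ⟨by simp, by simp⟩
    · rename_i hq
      obtain ⟨ih1, ih2⟩ := scanStrA_eq s (j + 1) (buf ++ [s[j]]) (by omega)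
      rw [hdj, popStr_cons _ _ hq]
      constructor
      · rw [ih1]; simp
      · rw [ih2]
  · rename_i h
    have hdj : s.drop j = [] := List.drop_eq_nil_of_le (by omega)
    rw [hdj]
    exact ⟨by simp [popStr], by simpa [popStr] using hdj⟩
termination_by s.length - j

theorem tokA_eq (s : List Char) (i : Nat) : tokA s i = tokB (s.drop i) := by
  by_cases h : i < s.length
  · have hd : s.drop i = s[i] :: s.drop (i + 1) := List.drop_eq_getElem_cons h
    rw [tokA, dif_pos h, hd, tokB.eq_def]
    by_cases hsp : PySem.Chars.isspace s[i] = true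
    · simp only [hsp, if_pos]
      exact tokA_eq s (i + 1)
    · simp only [if_neg hsp]
      by_cases hid : (PySem.Chars.isalpha s[i] || decide (s[i] = '_')) = true
      · simp only [if_pos hid, popRun_eq]
        rw [slice_scanRun pvIdentChar s i h,
          tokA_eq s (scanRunA pvIdentChar s (i + 1)), scanRunA_drop]
      · simp only [if_neg hid]
        by_cases h2 : i + 1 < s.length
        · have hd1 : s.drop (i + 1) = s[i + 1] :: s.drop (i + 2) := List.drop_eq_getElem_cons h2
          have hnd : pvNextDigit s i = PySem.Chars.isdigit s[i + 1] := by
            unfold pvNextDigit; rw [dif_pos h2]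
          rw [hd1, hnd]
          by_cases hnum :
              (PySem.Chars.isdigit s[i] || (decide (s[i] = '-') && PySem.Chars.isdigit s[i + 1])) = true
          · simp only [if_pos hnum, popRun_eq]
            rw [slice_scanRun pvNumChar s i h,
              tokA_eq s (scanRunA pvNumChar s (i + 1)), scanRunA_drop, hd1]
          · simp only [if_neg hnum]
            by_cases hq : s[i] = '\''
            · simp only [if_pos hq]
              obtain ⟨hs1, hs2⟩ := scanStrA_eq s (i + 1) [] (by omega)
              rw [tokA_eq s (scanStrA s (i + 1) []).2, hs2,
                show (scanStrA s (i + 1) []).1 = (popStr (s.drop (i + 1))).1 from by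
                  simp at hs1; exact hs1,
                hd1]
            · simp only [if_neg hq]
              by_cases hpn : s[i] = '(' ∨ s[i] = ')' ∨ s[i] = ','
              · simp only [if_pos hpn]
                rw [tokA_eq s (i + 1), hd1]
              · simp only [if_neg hpn]
                by_cases hop : s[i] = '=' ∨ s[i] = '<' ∨ s[i] = '>' ∨ s[i] = '!'
                · simp only [if_pos hop]
                  rw [slice_two s i h2]
                  by_cases htw : [s[i], s[i + 1]] ∈ pvTwoOps
                  · rw [if_pos (by simp [h2, htw]), if_pos (Or.inl htw), tokA_eq s (i + 2)]
                  · by_cases he : s[i + 1] = '='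
                    · rw [if_neg (by simp [htw]), if_pos (Or.inr he), dif_pos h2, if_pos he,
                        slice_two' s i h2, tokA_eq s (i + 2)]
                    · rw [if_neg (by simp [htw]), if_neg (by simp [htw, he]), dif_pos h2,
                        if_neg he, slice_one' s i h, tokA_eq s (i + 1), hd1]
                · simp only [if_neg hop]
                  rw [tokA_eq s (i + 1), hd1]
        · have hd1 : s.drop (i + 1) = [] := List.drop_eq_nil_of_le (by omega)
          have hnd : pvNextDigit s i = false := by
            unfold pvNextDigit; rw [dif_neg h2]
          rw [hd1, hnd]
          by_cases hnum : (PySem.Chars.isdigit s[i] || (decide (s[i] = '-') && false)) = true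
          · simp only [if_pos hnum, popRun_eq]
            rw [slice_scanRun pvNumChar s i h,
              tokA_eq s (scanRunA pvNumChar s (i + 1)), scanRunA_drop, hd1]
          · simp only [if_neg hnum]
            by_cases hq : s[i] = '\''
            · simp only [if_pos hq]
              obtain ⟨hs1, hs2⟩ := scanStrA_eq s (i + 1) [] (by omega)
              rw [tokA_eq s (scanStrA s (i + 1) []).2, hs2,
                show (scanStrA s (i + 1) []).1 = (popStr (s.drop (i + 1))).1 from by
                  simp at hs1; exact hs1,
                hd1]
            · simp only [if_neg hq]
              by_cases hpn : s[i] = '(' ∨ s[i] = ')' ∨ s[i] = ','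
              · simp only [if_pos hpn]
                rw [tokA_eq s (i + 1), hd1]
              · simp only [if_neg hpn]
                by_cases hop : s[i] = '=' ∨ s[i] = '<' ∨ s[i] = '>' ∨ s[i] = '!'
                · simp only [if_pos hop]
                  rw [if_neg (by simp [h2]), dif_neg h2, slice_one' s i h,
                    tokA_eq s (i + 1), hd1]
                · simp only [if_neg hop]
                  rw [tokA_eq s (i + 1), hd1]
  · rw [tokA, dif_neg h, List.drop_eq_nil_of_le (by omega)]
    rw [tokB.eq_def]
termination_by s.length - i
decreasing_by
  all_goals
    first
      | omega
      | (have := le_scanRunA pvIdentChar s (i + 1); omega)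
      | (have := le_scanRunA pvNumChar s (i + 1); omega)
      | (have := le_scanStrA s (i + 1) []; omega)

theorem stepA_eq (tl : List Char) (al : Option (List Char)) (ap : List Char)
    (hal : (al = none ∧ ap = []) ∨ (∃ a, al = some a ∧ ap = a ++ ['.']))
    (st : List (List Char) × List (List Char)) (tok : PvTok) :
    stepA tl al st tok =
      ((match tableOfTok tl tok with
        | some t => PySem.Set.add st.1 t
        | none => st.1),
       st.2 ++ [sqlOfTok tl ap tok]) := by
  cases tok with
  | str t => simp [stepA, sqlOfTok, tableOfTok]
  | num t => simp [stepA, sqlOfTok, tableOfTok]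
  | op t => simp [stepA, sqlOfTok, tableOfTok]
  | punct c => simp [stepA, sqlOfTok, tableOfTok]
  | ident t =>
    simp only [stepA, sqlOfTok, tableOfTok, List.span_eq_takeWhile_dropWhile, ne_eq, decide_not]
    by_cases hkw : PySem.Chars.lower t ∈ pvKws
    · simp [hkw]
    · simp only [if_neg hkw]
      by_cases hdot : '.' ∈ t
      · have hne : t.dropWhile (fun x => !decide (x = '.')) ≠ [] := by
          intro hnil
          rw [List.dropWhile_eq_nil_iff] at hnil
          have := hnil '.' hdot
          simp at this
        cases hdw : t.dropWhile (fun x => !decide (x = '.')) with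
        | nil => exact absurd hdw hne
        | cons c0 rest =>
          simp only [if_pos hdot]
          by_cases htl : PySem.Chars.lower (t.takeWhile (fun x => !decide (x = '.'))) = tl
          · simp only [htl]
            rcases hal with ⟨ha1, ha2⟩ | ⟨a, ha1, ha2⟩
            · subst ha1; subst ha2; simp
            · subst ha1; subst ha2; simp
          · simp only [if_neg htl]
            simp [PySem.Set.add, htl]
      · have hnil : t.dropWhile (fun x => !decide (x = '.')) = [] := by
          rw [List.dropWhile_eq_nil_iff]
          intro x hx
          simp only [Bool.not_eq_eq_eq_not, Bool.not_true, decide_eq_false_iff_not]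
          intro hxe; exact hdot (hxe ▸ hx)
        simp only [if_neg hdot, hnil]
        rcases hal with ⟨ha1, ha2⟩ | ⟨a, ha1, ha2⟩
        · subst ha1; subst ha2; simp
        · subst ha1; subst ha2; simp

theorem foldA_eq (tl : List Char) (al : Option (List Char)) (ap : List Char)
    (hal : (al = none ∧ ap = []) ∨ (∃ a, al = some a ∧ ap = a ++ ['.']))
    (toks : List PvTok) (st : List (List Char) × List (List Char)) :
    toks.foldl (stepA tl al) st =
      ((toks.filterMap (tableOfTok tl)).foldl PySem.Set.add st.1,
       st.2 ++ toks.map (sqlOfTok tl ap)) := by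
  induction toks generalizing st with
  | nil => simp
  | cons t ts ih =>
    rw [List.foldl_cons, stepA_eq tl al ap hal, ih]
    cases htok : tableOfTok tl t <;> simp [htok]

-- ===== VERDICT (by name: the statement is the Claim_ definition above) =====
theorem rewrite_policy_expr_spec : Claim_equal_rewrite_policy_expr := by
  unfold Claim_equal_rewrite_policy_expr
  intro target expr tal _
  unfold Spec_rewrite_policy_expr
  have htok : tokA expr.toList 0 = tokB expr.toList := by simpa using tokA_eq expr.toList 0
  cases tal with
  | none =>
    simp only [rewrite_policy_expr, rewrite_policy_expr_alt, htok]
    rw [foldA_eq _ _ _ (Or.inl ⟨rfl, rfl⟩)]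
    simp [PySem.List.dedup, PySem.Set.ofList, PySem.Set.empty]
  | some a =>
    by_cases ha : a.toList = []
    · simp only [rewrite_policy_expr, rewrite_policy_expr_alt, htok, ha, if_pos]
      rw [foldA_eq _ _ _ (Or.inl ⟨rfl, rfl⟩)]
      simp [PySem.List.dedup, PySem.Set.ofList, PySem.Set.empty]
    · simp only [rewrite_policy_expr, rewrite_policy_expr_alt, htok, if_neg ha]
      rw [foldA_eq _ _ _ (Or.inr ⟨a.toList, rfl, rfl⟩)]
      simp [PySem.List.dedup, PySem.Set.ofList, PySem.Set.empty]
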